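-- pv_equiv track=rewrite | github.com/gotutiyan/nlp_class_task | kadai2/kadai.py | make_tf
-- ===== SOURCE A (Python) =====
-- def make_tf(words, tags):
--     tf = dict()
--     # タグを登録
--     for t in tags:
--         if tf.get(t) == None:
--             tf.update({t:{}})
--
--     for i in range(len(tags)):
--         for word in words[i]:
--             if tf[tags[i]].get(word) == None:
--                 for tag in tf.keys():
--                     tf[tag].update({word:0})
--                 tf[tags[i]][word] = 1
--             else:
--                 tf[tags[i]][word] += 1
--     return tf
-- ===== SOURCE B (Python) =====
-- def make_tf(words, tags):
--     # Phase 1: count per tag, recording the global first-occurrence order of words.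
--     counts = {}
--     for t in tags:
--         counts[t] = {}
--     vocab = {}  # dict used as an insertion-ordered set
--     for i in range(len(tags)):
--         c = counts[tags[i]]
--         for w in words[i]:
--             vocab[w] = None
--             c[w] = c.get(w, 0) + 1
--     # Phase 2: build the full table, zero-filling from the shared vocabulary.
--     return {t: {w: c.get(w, 0) for w in vocab} for t, c in counts.items()}
-- ===== Notes on version B (the rewrite author's own statement) =====
-- stated objective: simpler
-- what changed: Replaces A's interleaved single pass (on each newly discovered word, pad every tag's dict with 0 on the spot) by a two-phase decomposition: one counting pass that also collects the shared vocabulary in first-occurrence order, then a fill phase building each tag's full row from that vocabulary.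
import Mathlib
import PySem

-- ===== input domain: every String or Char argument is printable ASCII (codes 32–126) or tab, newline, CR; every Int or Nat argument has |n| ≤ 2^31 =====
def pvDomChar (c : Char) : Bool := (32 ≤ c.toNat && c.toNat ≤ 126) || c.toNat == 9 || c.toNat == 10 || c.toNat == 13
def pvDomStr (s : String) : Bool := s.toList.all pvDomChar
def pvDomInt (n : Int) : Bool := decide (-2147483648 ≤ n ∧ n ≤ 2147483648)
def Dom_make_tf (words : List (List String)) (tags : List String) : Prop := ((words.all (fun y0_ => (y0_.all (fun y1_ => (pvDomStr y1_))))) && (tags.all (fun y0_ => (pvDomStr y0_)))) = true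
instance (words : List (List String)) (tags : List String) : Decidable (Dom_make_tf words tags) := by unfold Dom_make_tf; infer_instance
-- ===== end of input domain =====

-- B replaces A's interleaved pass (pad every tag's dict with 0 whenever a new word appears)
-- by a two-phase decomposition: count per tag while collecting the shared vocabulary, then fill the table.

-- ===== PORT A =====
-- Body of A's inner `for word in words[i]` loop (t = tags[i]); the `for tag in tf.keys()` padding
-- loop becomes a fold over the key list.
def stepA (t : String) (tf : PySem.Dict String (PySem.Dict String Int)) (word : String) :
    PySem.Dict String (PySem.Dict String Int) :=
  if (tf.getD t PySem.Dict.empty).get? word = none then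
    let tf1 := tf.keys.foldl
      (fun a tag => a.insert tag ((a.getD tag PySem.Dict.empty).insert word 0)) tf
    tf1.insert t ((tf1.getD t PySem.Dict.empty).insert word 1)
  else
    tf.insert t ((tf.getD t PySem.Dict.empty).insert word
      ((tf.getD t PySem.Dict.empty).getD word 0 + 1))

-- `words[i]` raises IndexError when len(tags) > len(words): excluded by Pre_make_tf, so the
-- `[]`/`""` defaults of pyGetD are never reached on admitted inputs (tags[i] is always in range).
def make_tf (words : List (List String)) (tags : List String) :
    List (String × List (String × Int)) :=
  let tf : PySem.Dict String (PySem.Dict String Int) :=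
    tags.foldl (fun tf t => if tf.get? t = none then tf.insert t PySem.Dict.empty else tf)
      PySem.Dict.empty
  let tf := (PySem.List.pyRange 0 (tags.length : Int) 1).foldl
      (fun tf i => (PySem.List.pyGetD words i []).foldl (stepA (PySem.List.pyGetD tags i "")) tf) tf
  tf.items.map (fun p => (p.1, p.2.items))

-- ===== PORT B =====
-- Body of B's inner `for w in words[i]` loop: bump the count of w under tag t (c aliases
-- counts[tags[i]] in the Python, so each bump lands in counts) and add w to the vocab set.
def stepB (t : String) (st : PySem.Dict String (PySem.Dict String Int) × List String) (w : String) :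
    PySem.Dict String (PySem.Dict String Int) × List String :=
  let c := st.1.getD t PySem.Dict.empty
  (st.1.insert t (c.insert w (c.getD w 0 + 1)), PySem.Set.add st.2 w)

def make_tf_alt (words : List (List String)) (tags : List String) :
    List (String × List (String × Int)) :=
  let counts : PySem.Dict String (PySem.Dict String Int) :=
    tags.foldl (fun d t => d.insert t PySem.Dict.empty) PySem.Dict.empty
  let st := (PySem.List.pyRange 0 (tags.length : Int) 1).foldl
      (fun st i => (PySem.List.pyGetD words i []).foldl (stepB (PySem.List.pyGetD tags i "")) st)
      (counts, ([] : List String))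
  st.1.items.map (fun p => (p.1, st.2.map (fun w => (w, p.2.getD w 0))))

-- ===== PRECONDITION & SPEC =====
-- A (and B) raise IndexError on words[i] when len(tags) > len(words); Pre_ excludes exactly that.
def Pre_make_tf (words : List (List String)) (tags : List String) : Prop :=
  tags.length ≤ words.length
instance (words : List (List String)) (tags : List String) : Decidable (Pre_make_tf words tags) := by
  unfold Pre_make_tf; infer_instance

def pvWitness_make_tf : List (List String) × List String := ([["a"], ["b", "a"]], ["x", "y"])

def Spec_make_tf (words : List (List String)) (tags : List String)
    (out : List (String × List (String × Int))) : Prop := out = make_tf_alt words tags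
instance (words : List (List String)) (tags : List String)
    (out : List (String × List (String × Int))) : Decidable (Spec_make_tf words tags out) := by
  unfold Spec_make_tf; infer_instance

-- ===== CLAIM (what is proved, stated in full; the proofs are below) =====
def Claim_equal_make_tf : Prop := ∀ (words : List (List String)) (tags : List String),
  Dom_make_tf words tags → Pre_make_tf words tags → Spec_make_tf words tags (make_tf words tags)

-- ===== LEMMAS AND PROOFS =====

-- The coupling invariant: A's dict-of-dicts is exactly the full table determined by B's
-- counts dict and vocabulary list.
def TfInv (c : PySem.Dict String (PySem.Dict String Int)) (v : List String)
    (tf : PySem.Dict String (PySem.Dict String Int)) : Prop :=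
  c.keys.Nodup ∧ v.Nodup ∧
  (∀ q ∈ c.items, ∀ x, q.2.contains x = true → x ∈ v) ∧
  tf.items = c.items.map (fun q =>
    (q.1, PySem.Dict.mk (v.map (fun x => (x, q.2.getD x 0)))))

-- keys are the firsts of items (definitional)
lemma keys_of_items_map {S : List String} {d : PySem.Dict String (PySem.Dict String Int)}
    (f : String → PySem.Dict String Int)
    (h : d.items = S.map (fun t => (t, f t))) : d.keys = S := by
  simp only [PySem.Dict.keys, h, List.map_map]
  exact List.map_id _

-- Phase 1 of A: conditional registration of the tags.
lemma initA_items (ts : List String) : ∀ (S : List String)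
    (d : PySem.Dict String (PySem.Dict String Int)), S.Nodup →
    d.items = S.map (fun t => (t, PySem.Dict.empty)) →
    (ts.foldl (fun tf t => if tf.get? t = none then tf.insert t PySem.Dict.empty else tf) d).items
      = (PySem.Set.update S ts).map (fun t => (t, PySem.Dict.empty)) := by
  induction ts with
  | nil => intro S d _ hd; simpa [PySem.Set.update] using hd
  | cons t ts ih =>
    intro S d hS hd
    have hkeys : d.keys = S := keys_of_items_map _ hd
    rw [List.foldl_cons, PySem.Set.update_cons]
    by_cases ht : t ∈ S
    · have hc : d.contains t = true := by
        rw [PySem.Dict.contains_iff_mem_keys, hkeys]; exact ht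
      have hg : ¬ d.get? t = none := by
        rw [PySem.Dict.get?_eq_none_iff_contains, hc]; simp
      rw [if_neg hg, PySem.Set.add_of_mem ht]
      exact ih S d hS hd
    · have hc : d.contains t = false := by
        rw [← Bool.not_eq_true, PySem.Dict.contains_iff_mem_keys, hkeys]; simpa using ht
      have hg : d.get? t = none := (PySem.Dict.get?_eq_none_iff_contains d t).2 hc
      rw [if_pos hg, PySem.Set.add_of_not_mem ht]
      apply ih (S ++ [t]) _ (by simp [List.nodup_append, hS]; intro a ha hat; exact ht (hat ▸ ha))
      rw [PySem.Dict.items_insert_of_not_contains d _ hc, hd, List.map_append]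
      rfl

-- Phase 1 of B: unconditional registration of the tags.
lemma initB_items (ts : List String) : ∀ (S : List String)
    (d : PySem.Dict String (PySem.Dict String Int)), S.Nodup →
    d.items = S.map (fun t => (t, PySem.Dict.empty)) →
    (ts.foldl (fun d t => d.insert t PySem.Dict.empty) d).items
      = (PySem.Set.update S ts).map (fun t => (t, PySem.Dict.empty)) := by
  induction ts with
  | nil => intro S d _ hd; simpa [PySem.Set.update] using hd
  | cons t ts ih =>
    intro S d hS hd
    have hkeys : d.keys = S := keys_of_items_map _ hd
    rw [List.foldl_cons, PySem.Set.update_cons]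
    by_cases ht : t ∈ S
    · have hc : d.contains t = true := by
        rw [PySem.Dict.contains_iff_mem_keys, hkeys]; exact ht
      rw [PySem.Set.add_of_mem ht]
      apply ih S _ hS
      rw [PySem.Dict.items_insert_of_contains d _ hc, hd, List.map_map]
      apply List.map_congr_left
      intro s _
      by_cases hst : s = t
      · subst hst; simp
      · simp [hst]
    · have hc : d.contains t = false := by
        rw [← Bool.not_eq_true, PySem.Dict.contains_iff_mem_keys, hkeys]; simpa using ht
      rw [PySem.Set.add_of_not_mem ht]
      apply ih (S ++ [t]) _ (by simp [List.nodup_append, hS]; intro a ha hat; exact ht (hat ▸ ha))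
      rw [PySem.Dict.items_insert_of_not_contains d _ hc, hd, List.map_append]
      rfl

-- A's padding loop over the (distinct) keys inserts (word, 0) into every inner dict.
lemma pad_items (word : String) : ∀ (K : List String)
    (a : PySem.Dict String (PySem.Dict String Int)), K.Nodup → a.keys.Nodup →
    (∀ t ∈ K, t ∈ a.keys) →
    (K.foldl (fun a tag => a.insert tag ((a.getD tag PySem.Dict.empty).insert word 0)) a).items
      = a.items.map (fun q => if q.1 ∈ K then (q.1, q.2.insert word 0) else q) := by
  intro K
  induction K with
  | nil => intro a _ _ _; simp
  | cons tg K ih =>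
    intro a hK ha hsub
    have htg : tg ∈ a.keys := hsub tg (by simp)
    have hc : a.contains tg = true := (PySem.Dict.contains_iff_mem_keys _ _).2 htg
    rw [List.foldl_cons]
    have hstep : (a.insert tg ((a.getD tg PySem.Dict.empty).insert word 0)).items
        = a.items.map (fun q => if q.1 = tg then (q.1, q.2.insert word 0) else q) := by
      rw [PySem.Dict.items_insert_of_contains a _ hc]
      apply List.map_congr_left
      intro q hq
      by_cases hqt : q.1 = tg
      · have : a.getD tg PySem.Dict.empty = q.2 := by
          have : (tg, q.2) ∈ a.items := by
            have := hq; rwa [show q = (q.1, q.2) from rfl, hqt] at this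
          exact PySem.Dict.getD_of_mem_items a this ha _
        simp [hqt, this]
      · simp [hqt]
    have hkeys' : (a.insert tg ((a.getD tg PySem.Dict.empty).insert word 0)).keys = a.keys :=
      PySem.Dict.keys_insert_of_contains a _ hc
    rw [ih _ hK.of_cons (by rw [hkeys']; exact ha)
        (fun s hs => by rw [hkeys']; exact hsub s (by simp [hs])), hstep, List.map_map]
    apply List.map_congr_left
    intro q hq
    by_cases hqt : q.1 = tg
    · have hnotK : q.1 ∉ K := by rw [hqt]; exact (List.nodup_cons.1 hK).1
      rw [hqt] at hnotK
      simp [Function.comp, hqt, hnotK]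
    · by_cases hqK : q.1 ∈ K <;> simp [hqt, hqK]


-- keys of the full table built over c's items are c's keys
lemma keys_of_table {d c : PySem.Dict String (PySem.Dict String Int)}
    (g : String × PySem.Dict String Int → PySem.Dict String Int)
    (h : d.items = c.items.map (fun q => (q.1, g q))) : d.keys = c.keys := by
  simp only [PySem.Dict.keys, h, List.map_map]
  rfl

lemma getD_of_shape {d c : PySem.Dict String (PySem.Dict String Int)}
    {g : String × PySem.Dict String Int → PySem.Dict String Int}
    (h : d.items = c.items.map (fun q => (q.1, g q))) (hks : c.keys.Nodup)
    {q : String × PySem.Dict String Int} (hq : q ∈ c.items) :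
    d.getD q.1 PySem.Dict.empty = g q := by
  have hmem : (q.1, g q) ∈ d.items := by
    rw [h]; exact List.mem_map.2 ⟨q, hq, rfl⟩
  exact PySem.Dict.getD_of_mem_items d hmem (by rw [keys_of_table g h]; exact hks) _

lemma entry_exists {c : PySem.Dict String (PySem.Dict String Int)} {t : String}
    (ht : t ∈ c.keys) : ∃ q ∈ c.items, q.1 = t := by
  simp only [PySem.Dict.keys] at ht
  rcases List.mem_map.1 ht with ⟨q, hq, hqt⟩
  exact ⟨q, hq, hqt⟩

lemma keys_mk_map (v : List String) (f : String → Int) :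
    (PySem.Dict.mk (v.map (fun x => (x, f x)))).keys = v := by
  simp only [PySem.Dict.keys, List.map_map]
  exact List.map_id _

-- inserting at a word already in the vocabulary updates the table row in place
lemma mk_map_insert_mem {v : List String} {w : String} (hw : w ∈ v)
    (ct : PySem.Dict String Int) (n : Int) :
    (PySem.Dict.mk (v.map (fun x => (x, ct.getD x 0)))).insert w n
      = PySem.Dict.mk (v.map (fun x => (x, (ct.insert w n).getD x 0))) := by
  apply PySem.Dict.ext
  have hc : (PySem.Dict.mk (v.map (fun x => (x, ct.getD x 0)))).contains w = true :=
    (PySem.Dict.contains_iff_mem_keys _ _).2 (by rw [keys_mk_map]; exact hw)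
  rw [PySem.Dict.items_insert_of_contains _ _ hc]
  show (v.map _).map _ = _
  rw [List.map_map]
  apply List.map_congr_left
  intro x _
  by_cases hxw : x = w
  · subst hxw; simp [PySem.Dict.getD_insert_self]
  · simp [hxw, PySem.Dict.getD_insert_of_ne ct n 0 hxw]

-- inserting a fresh word appends a fresh zero/column entry
lemma mk_map_insert_not_mem {v : List String} {w : String} (hw : w ∉ v)
    {q2 : PySem.Dict String Int} (hq2 : q2.contains w = false) :
    (PySem.Dict.mk (v.map (fun x => (x, q2.getD x 0)))).insert w 0
      = PySem.Dict.mk ((v ++ [w]).map (fun x => (x, q2.getD x 0))) := by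
  apply PySem.Dict.ext
  have hc : (PySem.Dict.mk (v.map (fun x => (x, q2.getD x 0)))).contains w = false := by
    rw [← Bool.not_eq_true, PySem.Dict.contains_iff_mem_keys, keys_mk_map]
    simpa using hw
  rw [PySem.Dict.items_insert_of_not_contains _ _ hc]
  show v.map _ ++ _ = (v ++ [w]).map _
  rw [List.map_append]
  simp [PySem.Dict.getD_of_not_contains q2 0 hq2]

-- One word preserves the coupling invariant.
lemma step_inv {c : PySem.Dict String (PySem.Dict String Int)} {v : List String}
    {tf : PySem.Dict String (PySem.Dict String Int)} (t w : String)
    (hInv : TfInv c v tf) (ht : t ∈ c.keys) :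
    TfInv (stepB t (c, v) w).1 (stepB t (c, v) w).2 (stepA t tf w) := by
  obtain ⟨hks, hv, hcv, htf⟩ := hInv
  obtain ⟨qt, hqt, hqt1⟩ := entry_exists ht
  have hct : c.getD t PySem.Dict.empty = qt.2 := by
    rw [← hqt1]
    exact PySem.Dict.getD_of_mem_items c (show (qt.1, qt.2) ∈ c.items from hqt) hks _
  have htfk : tf.keys = c.keys := keys_of_table _ htf
  have htfnd : tf.keys.Nodup := by rw [htfk]; exact hks
  have hcont : c.contains t = true := (PySem.Dict.contains_iff_mem_keys _ _).2 ht
  have htft : tf.getD t PySem.Dict.empty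
      = PySem.Dict.mk (v.map (fun x => (x, qt.2.getD x 0))) := by
    have h := getD_of_shape htf hks hqt
    rwa [hqt1] at h
  have htfc : tf.contains t = true := by
    rw [PySem.Dict.contains_iff_mem_keys, htfk]; exact ht
  by_cases hw : w ∈ v
  · -- word already in the vocabulary: A takes the += branch
    have hcond : ¬ (tf.getD t PySem.Dict.empty).get? w = none := by
      rw [htft, PySem.Dict.get?_eq_none_iff_not_mem_keys, keys_mk_map]
      simp [hw]
    have hB1 : (stepB t (c, v) w).1
        = c.insert t (qt.2.insert w (qt.2.getD w 0 + 1)) := by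
      simp only [stepB, hct]
    have hB2 : (stepB t (c, v) w).2 = v := by
      simp only [stepB]
      exact PySem.Set.add_of_mem hw
    have hckeys : (c.insert t (qt.2.insert w (qt.2.getD w 0 + 1))).keys = c.keys :=
      PySem.Dict.keys_insert_of_contains c _ hcont
    rw [hB1, hB2]
    refine ⟨by rw [hckeys]; exact hks, hv, ?_, ?_⟩
    · intro q' hq' x hx
      rcases (PySem.Dict.mem_items_insert c t _ q').1 hq' with h | ⟨hmem, _⟩
      · subst h
        rw [PySem.Dict.contains_insert] at hx
        rcases Bool.or_eq_true_iff.1 hx with h' | h'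
        · rw [show x = w from by simpa using h']; exact hw
        · exact hcv qt hqt x h'
      · exact hcv q' hmem x hx
    · have hcond' : ¬ (PySem.Dict.mk (v.map (fun x => (x, qt.2.getD x 0)))).get? w = none := by
        rw [← htft]; exact hcond
      simp only [stepA, htft]
      rw [if_neg hcond']
      have hgD : (PySem.Dict.mk (v.map (fun x => (x, qt.2.getD x 0)))).getD w 0
          = qt.2.getD w 0 := by
        refine PySem.Dict.getD_of_mem_items _ ?_ ?_ _
        · exact List.mem_map.2 ⟨w, hw, rfl⟩
        · rw [keys_mk_map]; exact hv
      rw [hgD, mk_map_insert_mem hw qt.2 _]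
      rw [PySem.Dict.items_insert_of_contains tf _ htfc,
        PySem.Dict.items_insert_of_contains c _ hcont, htf, List.map_map, List.map_map]
      apply List.map_congr_left
      intro q _
      by_cases hq1 : q.1 = t
      · simp [Function.comp, hq1]
      · simp [Function.comp, hq1]
  · -- new word: A pads every tag's dict with 0, then sets this tag's count to 1
    have hcond : (tf.getD t PySem.Dict.empty).get? w = none := by
      rw [htft, PySem.Dict.get?_eq_none_iff_not_mem_keys, keys_mk_map]
      exact hw
    have hq2c : ∀ q ∈ c.items, q.2.contains w = false := by
      intro q hq
      by_contra h
      exact hw (hcv q hq w (Bool.not_eq_false _ ▸ h))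
    have hqt0 : qt.2.getD w 0 = 0 := PySem.Dict.getD_of_not_contains qt.2 0 (hq2c qt hqt)
    have hB1 : (stepB t (c, v) w).1 = c.insert t (qt.2.insert w 1) := by
      simp only [stepB, hct, hqt0]
      norm_num
    have hB2 : (stepB t (c, v) w).2 = v ++ [w] := by
      simp only [stepB]
      exact PySem.Set.add_of_not_mem hw
    have hckeys : (c.insert t (qt.2.insert w 1)).keys = c.keys :=
      PySem.Dict.keys_insert_of_contains c _ hcont
    have hvw : (v ++ [w]).Nodup := by
      simp only [List.nodup_append]
      refine ⟨hv, by simp, ?_⟩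
      intro a ha
      simp only [List.mem_singleton]
      rintro b rfl h
      exact hw (h ▸ ha)
    rw [hB1, hB2]
    refine ⟨by rw [hckeys]; exact hks, hvw, ?_, ?_⟩
    · intro q' hq' x hx
      rcases (PySem.Dict.mem_items_insert c t _ q').1 hq' with h | ⟨hmem, _⟩
      · subst h
        rw [PySem.Dict.contains_insert] at hx
        rcases Bool.or_eq_true_iff.1 hx with h' | h'
        · simp [show x = w from by simpa using h']
        · exact List.mem_append_left _ (hcv qt hqt x h')
      · exact List.mem_append_left _ (hcv q' hmem x hx)
    · have hcond' : (PySem.Dict.mk (v.map (fun x => (x, qt.2.getD x 0)))).get? w = none := by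
        rw [← htft]; exact hcond
      simp only [stepA, htft]
      rw [if_pos hcond']
      have htf1 : (tf.keys.foldl
          (fun a tag => a.insert tag ((a.getD tag PySem.Dict.empty).insert w 0)) tf).items
          = c.items.map (fun q =>
              (q.1, PySem.Dict.mk ((v ++ [w]).map (fun x => (x, q.2.getD x 0))))) := by
        rw [pad_items w tf.keys tf htfnd htfnd (fun _ h => h)]
        have h1 : tf.items.map (fun q => if q.1 ∈ tf.keys then (q.1, q.2.insert w 0) else q)
            = tf.items.map (fun q => (q.1, q.2.insert w 0)) := by
          apply List.map_congr_left
          intro q hq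
          rw [if_pos (PySem.Dict.mem_keys_of_mem_items _ hq)]
        rw [h1, htf, List.map_map]
        apply List.map_congr_left
        intro q hq
        show (q.1, (PySem.Dict.mk (v.map (fun x => (x, q.2.getD x 0)))).insert w 0) = _
        rw [mk_map_insert_not_mem hw (hq2c q hq)]
      have htf1t : (tf.keys.foldl
          (fun a tag => a.insert tag ((a.getD tag PySem.Dict.empty).insert w 0)) tf).getD t
            PySem.Dict.empty
          = PySem.Dict.mk ((v ++ [w]).map (fun x => (x, qt.2.getD x 0))) := by
        have h := getD_of_shape htf1 hks hqt
        rwa [hqt1] at h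
      have htf1c : (tf.keys.foldl
          (fun a tag => a.insert tag ((a.getD tag PySem.Dict.empty).insert w 0)) tf).contains t
            = true := by
        rw [PySem.Dict.contains_iff_mem_keys, keys_of_table _ htf1]
        exact ht
      rw [htf1t, mk_map_insert_mem (List.mem_append_right _ (by simp)) qt.2 1,
        PySem.Dict.items_insert_of_contains _ _ htf1c,
        PySem.Dict.items_insert_of_contains c _ hcont, htf1, List.map_map, List.map_map]
      apply List.map_congr_left
      intro q _
      by_cases hq1 : q.1 = t
      · simp [Function.comp, hq1]
      · simp [Function.comp, hq1]

lemma step_keys {c : PySem.Dict String (PySem.Dict String Int)} {v : List String}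
    (t w : String) (ht : t ∈ c.keys) : (stepB t (c, v) w).1.keys = c.keys := by
  apply PySem.Dict.keys_insert_of_contains
  exact (PySem.Dict.contains_iff_mem_keys _ _).2 ht

-- The invariant survives the whole (flattened) pass.
lemma fold_inv : ∀ (P : List (String × String)) (c : PySem.Dict String (PySem.Dict String Int))
    (v : List String) (tf : PySem.Dict String (PySem.Dict String Int)),
    TfInv c v tf → (∀ p ∈ P, p.1 ∈ c.keys) →
    TfInv (P.foldl (fun st p => stepB p.1 st p.2) (c, v)).1
        (P.foldl (fun st p => stepB p.1 st p.2) (c, v)).2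
        (P.foldl (fun tf p => stepA p.1 tf p.2) tf) := by
  intro P
  induction P with
  | nil => intro c v tf h _; exact h
  | cons p P ih =>
    intro c v tf h hP
    have ht : p.1 ∈ c.keys := hP p (by simp)
    have h' := step_inv p.1 p.2 h ht
    have hk := step_keys (v := v) p.1 p.2 ht
    simp only [List.foldl_cons]
    have : stepB p.1 (c, v) p.2 = ((stepB p.1 (c, v) p.2).1, (stepB p.1 (c, v) p.2).2) := rfl
    rw [this]
    exact ih _ _ _ h' (fun q hq => by rw [hk]; exact hP q (by simp [hq]))

-- Flattening the two nested loops into one pass over (tag, word) pairs.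
lemma nestedA (R : List Int) (words : List (List String)) (tags : List String)
    (tf0 : PySem.Dict String (PySem.Dict String Int)) :
    R.foldl (fun tf i => (PySem.List.pyGetD words i []).foldl
        (stepA (PySem.List.pyGetD tags i "")) tf) tf0
      = (R.flatMap (fun i => (PySem.List.pyGetD words i []).map
          (fun w => (PySem.List.pyGetD tags i "", w)))).foldl
          (fun tf p => stepA p.1 tf p.2) tf0 := by
  rw [List.foldl_flatMap]
  congr 1
  funext acc i
  rw [List.foldl_map]

lemma nestedB (R : List Int) (words : List (List String)) (tags : List String)
    (st0 : PySem.Dict String (PySem.Dict String Int) × List String) :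
    R.foldl (fun st i => (PySem.List.pyGetD words i []).foldl
        (stepB (PySem.List.pyGetD tags i "")) st) st0
      = (R.flatMap (fun i => (PySem.List.pyGetD words i []).map
          (fun w => (PySem.List.pyGetD tags i "", w)))).foldl
          (fun st p => stepB p.1 st p.2) st0 := by
  rw [List.foldl_flatMap]
  congr 1
  funext acc i
  rw [List.foldl_map]

-- Every tag produced by the flattened pair list is a registered tag.
lemma pairs_mem (words : List (List String)) (tags : List String) :
    ∀ p ∈ ((PySem.List.pyRange 0 (tags.length : Int) 1).flatMap
      (fun i => (PySem.List.pyGetD words i []).map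
        (fun w => (PySem.List.pyGetD tags i "", w)))), p.1 ∈ tags := by
  intro p hp
  rcases List.mem_flatMap.1 hp with ⟨i, hi, hpi⟩
  rcases List.mem_map.1 hpi with ⟨w, _, rfl⟩
  rcases PySem.List.mem_pyRange_one.1 hi with ⟨h0, h1⟩
  rw [PySem.List.pyGetD_eq_getElem tags "" h0 h1]
  exact List.getElem_mem _

-- ===== VERDICT (by name: the statement is the Claim_ definition above) =====
theorem make_tf_spec : Claim_equal_make_tf := by
  intro words tags _ _
  show make_tf words tags = make_tf_alt words tags
  have hinitA := initA_items tags [] PySem.Dict.empty (by simp) (by rfl)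
  have hinitB := initB_items tags [] PySem.Dict.empty (by simp) (by rfl)
  have hC0keys : (tags.foldl (fun d t => d.insert t PySem.Dict.empty) PySem.Dict.empty).keys
      = PySem.Set.update [] tags := keys_of_items_map _ hinitB
  have hInv0 : TfInv (tags.foldl (fun d t => d.insert t PySem.Dict.empty) PySem.Dict.empty) []
      (tags.foldl (fun tf t => if tf.get? t = none then tf.insert t PySem.Dict.empty else tf)
        PySem.Dict.empty) := by
    refine ⟨?_, List.nodup_nil, ?_, ?_⟩
    · rw [hC0keys]; exact PySem.Set.nodup_update _ _ List.nodup_nil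
    · intro q hq x hx
      rw [hinitB] at hq
      rcases List.mem_map.1 hq with ⟨t', _, rfl⟩
      simp [PySem.Dict.contains_empty] at hx
    · rw [hinitA, hinitB, List.map_map]
      rfl
  have hP := pairs_mem words tags
  have h := fold_inv _ _ _ _ hInv0 (fun p hp => by
    rw [hC0keys]
    have : p.1 ∈ PySem.Set.ofList tags := (PySem.Set.mem_ofList _ _).2 (hP p hp)
    rwa [PySem.Set.update_nil_left] )
  simp only [make_tf, make_tf_alt]
  rw [nestedA, nestedB]
  rw [h.2.2.2, List.map_map]
  rfl
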